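-- pv_equiv track=rewrite | github.com/akdl911215/algorithmTraining | python/algorithm/everything_algorithm/algorithm_study/level3/연속펄스부분수열의합/연속펄스부분수열의합4.py | solution
-- ===== SOURCE A (Python) =====
-- def solution(sequence):
--     # 길이가 1인 경우, 최대값은 수열의 첫 번째 원소입니다.
--     if len(sequence) == 1:
--         return sequence[0]
--
--     # dp1과 dp2 배열 초기화: dp1은 1로 시작하는 펄스 수열, dp2는 -1로 시작하는 펄스 수열
--     dp1 = [0] * len(sequence)
--     dp2 = [0] * len(sequence)
--
--     # 초기값 설정
--     dp1[0] = sequence[0]  # 1로 시작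
--     dp2[0] = -sequence[0]  # -1로 시작
--
--     # 최대 합을 저장할 변수
--     max_sum = max(dp1[0], dp2[0])
--
--     # 동적 프로그래밍을 사용하여 각 위치에서의 최대 연속 펄스 부분 수열의 합을 계산
--     for i in range(1, len(sequence)):
--         dp1[i] = max(dp1[i - 1] + sequence[i] * ((-1) ** (i + 1)), sequence[i] * ((-1) ** (i + 1)))
--         dp2[i] = max(dp2[i - 1] + sequence[i] * ((-1) ** i), sequence[i] * ((-1) ** i))
--
--         # 현재 위치에서의 최대값을 max_sum에 저장
--         max_sum = max(max_sum, dp1[i], dp2[i])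
--
--     return max_sum
-- ===== SOURCE B (Python) =====
-- def solution(sequence):
--     if len(sequence) == 1:
--         return sequence[0]
--     # sign-transformed list: max pulse sum = max subarray sum of t or of -t
--     t = [sequence[0]] + [x * (-1) ** (i + 1) for i, x in enumerate(sequence[1:], 1)]
--     # prefix sums of t; a subarray sum is a difference of two prefix sums, so
--     # one scan tracking the running min and max prefix yields both maxima
--     prefs = [0]
--     for x in t:
--         prefs.append(prefs[-1] + x)
--     best = max(prefs[1], -prefs[1])
--     lo = min(0, prefs[1])
--     hi = max(0, prefs[1])
--     for p in prefs[2:]: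
--         best = max(best, p - lo, hi - p)
--         lo = min(lo, p)
--         hi = max(hi, p)
--     return best
-- ===== Notes on version B (the rewrite author's own statement) =====
-- stated objective: alternative
-- what changed: Replaced A's two Kadane-style DP recurrences with a prefix-sum algorithm: build the sign-transformed list, compute its prefix sums, and a single scan tracking the running min and max prefix returns the max over pairs of (p - minPrefix) and (maxPrefix - p), which equals the two DP maxima.
import Mathlib
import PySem

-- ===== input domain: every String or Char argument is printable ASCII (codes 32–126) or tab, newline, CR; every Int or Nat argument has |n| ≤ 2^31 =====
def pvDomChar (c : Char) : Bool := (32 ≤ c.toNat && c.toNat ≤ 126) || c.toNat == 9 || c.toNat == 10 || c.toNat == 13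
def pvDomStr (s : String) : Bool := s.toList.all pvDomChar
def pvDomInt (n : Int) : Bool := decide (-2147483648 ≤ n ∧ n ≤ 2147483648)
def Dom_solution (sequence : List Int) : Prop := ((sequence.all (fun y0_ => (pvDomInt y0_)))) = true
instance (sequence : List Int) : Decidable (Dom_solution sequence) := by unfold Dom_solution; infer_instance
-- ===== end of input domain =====

-- B replaces A's two Kadane-style DP recurrences by prefix sums of the sign-transformed list
-- and one scan over them tracking the running min and max prefix; return value only, no speed claim.

-- ===== PORT A =====
-- A's loop `for i in range(1, len(sequence))` reading sequence[i] is transliterated as a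
-- fold over (sequence.tail).zipIdx 1, i.e. the elements sequence[i] paired with their index i.
-- State is (dp1[i-1], dp2[i-1], max_sum).
def solution (sequence : List Int) : Int :=
  match sequence with
  | [] => 0  -- unreachable: Python raises IndexError here; excluded by Pre_solution
  | s0 :: rest =>
    if sequence.length = 1 then s0
    else
      let st := rest.zipIdx 1 |>.foldl
        (fun (st : Int × Int × Int) (p : Int × Nat) =>
          let x := p.1
          let i := p.2
          let d1 := max (st.1 + x * (-1 : Int) ^ (i + 1)) (x * (-1 : Int) ^ (i + 1))
          let d2 := max (st.2.1 + x * (-1 : Int) ^ i) (x * (-1 : Int) ^ i)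
          (d1, d2, max st.2.2 (max d1 d2)))
        (s0, -s0, max s0 (-s0))
      st.2.2

-- ===== PORT B =====
-- Source B's `for x in t: prefs.append(prefs[-1] + x)` : each step appends acc + x; this
-- recursion produces prefs[1:], the running prefix sums starting from acc.
def prefsFrom (acc : Int) : List Int → List Int
  | [] => []
  | x :: xs => (acc + x) :: prefsFrom (acc + x) xs

def solution_alt (sequence : List Int) : Int :=
  match sequence with
  | [] => 0  -- unreachable: Python raises IndexError here; excluded by Pre_solution
  | s0 :: rest =>
    if sequence.length = 1 then s0
    else
      let t := s0 :: (rest.zipIdx 1 |>.map (fun p => p.1 * (-1 : Int) ^ (p.2 + 1)))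
      let prefs := (0 : Int) :: prefsFrom 0 t
      match prefs with
      | _ :: p1 :: ps =>
        -- loop over prefs[2:], state (best, lo, hi)
        let st := ps.foldl
          (fun (st : Int × Int × Int) (p : Int) =>
            (max (max st.1 (p - st.2.1)) (st.2.2 - p), min st.2.1 p, max st.2.2 p))
          (max p1 (-p1), min 0 p1, max 0 p1)
        st.1
      | _ => 0  -- unreachable: prefs has ≥ 2 elements since t is nonempty

-- ===== PRECONDITION & SPEC =====
-- Pre_ excludes only the empty list, on which both A and B raise IndexError (sequence[0]).
def Pre_solution (sequence : List Int) : Prop := sequence ≠ []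
instance (sequence : List Int) : Decidable (Pre_solution sequence) := by unfold Pre_solution; infer_instance
def pvWitness_solution : List Int := [2, -3, 5, 1]

def Spec_solution (sequence : List Int) (out : Int) : Prop := out = solution_alt sequence
instance (sequence : List Int) (out : Int) : Decidable (Spec_solution sequence out) := by unfold Spec_solution; infer_instance

-- ===== CLAIM (what is proved, stated in full; the proofs are below) =====
def Claim_equal_solution : Prop := ∀ (sequence : List Int), Dom_solution sequence → Pre_solution sequence → Spec_solution sequence (solution sequence)

-- ===== LEMMAS AND PROOFS =====

-- A's combined step, rewritten over the transformed values y = x * (-1)^(i+1)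
def combStep (st : Int × Int × Int) (y : Int) : Int × Int × Int :=
  let d1 := max (st.1 + y) y
  let d2 := max (st.2.1 + -y) (-y)
  (d1, d2, max st.2.2 (max d1 d2))

-- B's scan step over a prefix sum p, state (best, lo, hi)
def bStep (st : Int × Int × Int) (p : Int) : Int × Int × Int :=
  (max (max st.1 (p - st.2.1)) (st.2.2 - p), min st.2.1 p, max st.2.2 p)

-- A's fold over indexed elements equals the comb fold over the sign-transformed list
lemma foldA_eq_comb (rest : List Int) (k : Nat) (st : Int × Int × Int) :
    (rest.zipIdx k).foldl
      (fun (st : Int × Int × Int) (p : Int × Nat) =>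
        let x := p.1
        let i := p.2
        let d1 := max (st.1 + x * (-1 : Int) ^ (i + 1)) (x * (-1 : Int) ^ (i + 1))
        let d2 := max (st.2.1 + x * (-1 : Int) ^ i) (x * (-1 : Int) ^ i)
        (d1, d2, max st.2.2 (max d1 d2))) st
    = ((rest.zipIdx k).map (fun p => p.1 * (-1 : Int) ^ (p.2 + 1))).foldl combStep st := by
  induction rest generalizing k st with
  | nil => rfl
  | cons x xs ih =>
      simp only [List.zipIdx_cons, List.foldl_cons, List.map_cons]
      rw [ih]
      congr 1
      have h : x * (-1 : Int) ^ k = -(x * (-1 : Int) ^ (k + 1)) := by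
        rw [pow_succ]; ring
      simp only [combStep, h]

-- the comb (double-Kadane) fold and the prefix-sum scan compute the same best:
-- invariant c1 = p - lo, c2 = hi - p between A's DP state and the prefixes seen so far
lemma comb_eq_prefscan (u : List Int) (p lo hi b : Int) :
    (u.foldl combStep (p - lo, hi - p, b)).2.2
      = ((prefsFrom p u).foldl bStep (b, min lo p, max hi p)).1 := by
  induction u generalizing p lo hi b with
  | nil => rfl
  | cons y ys ih =>
      simp only [prefsFrom, List.foldl_cons]
      have e1 : max (p - lo + y) y = (p + y) - min lo p := by omega
      have e2 : max (hi - p + -y) (-y) = max hi p - (p + y) := by omega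
      have e3 : max b (max ((p + y) - min lo p) (max hi p - (p + y)))
          = max (max b ((p + y) - min lo p)) (max hi p - (p + y)) := by omega
      simp only [combStep, bStep, e1, e2, e3]
      have := ih (p + y) (min lo p) (max hi p) (max (max b ((p + y) - min lo p)) (max hi p - (p + y)))
      simpa [min_assoc, max_assoc] using this

-- ===== VERDICT (by name: the statement is the Claim_ definition above) =====
theorem solution_spec : Claim_equal_solution := by
  intro sequence _hdom hpre
  unfold Spec_solution
  match sequence with
  | [] => exact absurd rfl hpre
  | s0 :: rest =>
    simp only [solution, solution_alt]
    by_cases hlen : (s0 :: rest).length = 1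
    · simp [hlen]
    · simp only [hlen, if_false]
      rw [foldA_eq_comb]
      simp only [prefsFrom, zero_add]
      have := comb_eq_prefscan (rest.zipIdx 1 |>.map (fun p => p.1 * (-1 : Int) ^ (p.2 + 1)))
        s0 0 0 (max s0 (-s0))
      simp only [sub_zero, zero_sub] at this
      exact this
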